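-- pv_equiv track=rewrite | github.com/matthewneely/WhatWaf | content/tampers/maskenclosebrackets.py | tamper
-- ===== SOURCE A (Python) =====
-- import string
--
-- def tamper(payload, **kwargs):
--     payload = str(payload)
--     to_enclose = string.digits
--     retval = ""
--     for char in payload:
--         if char in to_enclose:
--             retval += "[%EF%BC%87{}%EF%BC%87]".format(char)
--         else:
--             retval += char
--     return retval
-- ===== SOURCE B (Python) =====
-- import string
--
-- def tamper(payload, **kwargs):
--     # Staged: first locate the digit occurrences, then stitch the untouched
--     # slices between them together with the wrapped digits and join once.
--     s = str(payload)
--     cuts = [(i, ch) for i, ch in enumerate(s) if ch in string.digits]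
--     pieces = []
--     prev = 0
--     for i, ch in cuts:
--         pieces.append(s[prev:i])
--         pieces.append("[%EF%BC%87" + ch + "%EF%BC%87]")
--         prev = i + 1
--     pieces.append(s[prev:])
--     return "".join(pieces)
-- ===== Notes on version B (the rewrite author's own statement) =====
-- stated objective: alternative
-- what changed: Instead of one accumulator loop that tests and concatenates per character, B first computes the list of digit positions, then rebuilds the string from whole untouched slices between those positions interleaved with the wrapped digits, joined once.
import Mathlib
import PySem

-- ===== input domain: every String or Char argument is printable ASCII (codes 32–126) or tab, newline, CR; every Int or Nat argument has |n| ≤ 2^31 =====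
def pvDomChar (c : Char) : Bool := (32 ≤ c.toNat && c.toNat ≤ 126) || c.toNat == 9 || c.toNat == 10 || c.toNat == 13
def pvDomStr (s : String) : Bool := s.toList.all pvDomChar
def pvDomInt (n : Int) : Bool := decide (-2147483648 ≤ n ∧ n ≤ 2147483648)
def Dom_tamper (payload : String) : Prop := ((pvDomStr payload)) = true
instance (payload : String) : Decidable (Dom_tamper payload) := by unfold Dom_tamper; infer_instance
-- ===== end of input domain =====

-- B restructures A's per-character accumulator loop into two staged passes: locate the digit positions,
-- then stitch the untouched slices between them with the wrapped digits and join once (alternative, same cost).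

-- ===== PORT A =====
-- string.digits
def tamperDigits : List Char := "0123456789".toList
-- "[%EF%BC%87{}%EF%BC%87]".format(char)  /  "[%EF%BC%87" + ch + "%EF%BC%87]"
def tamperWrap (c : Char) : List Char := "[%EF%BC%87".toList ++ [c] ++ "%EF%BC%87]".toList

def tamper (payload : String) : String :=
  String.mk (payload.toList.foldl
    (fun retval c => retval ++ (if c ∈ tamperDigits then tamperWrap c else [c])) [])

-- ===== PORT B =====
-- loop body: pieces.append(s[prev:i]); pieces.append(wrap ch); prev = i + 1
def tamperStep (s : List Char) (st : List (List Char) × Int) (p : Int × Char) :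
    List (List Char) × Int :=
  (st.1 ++ [PySem.List.slice s (some st.2) (some p.1), tamperWrap p.2], p.1 + 1)

def tamper_alt (payload : String) : String :=
  let s := payload.toList
  -- cuts = [(i, ch) for i, ch in enumerate(s) if ch in string.digits]
  let cuts := (PySem.List.enumerate s 0).filter (fun p => p.2 ∈ tamperDigits)
  let r := cuts.foldl (tamperStep s) ([], 0)
  -- pieces.append(s[prev:]); return "".join(pieces)
  String.mk (r.1 ++ [PySem.List.slice s (some r.2) none]).flatten

-- ===== PRECONDITION & SPEC =====
def Spec_tamper (payload : String) (out : String) : Prop := out = tamper_alt payload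
instance (payload : String) (out : String) : Decidable (Spec_tamper payload out) := by unfold Spec_tamper; infer_instance

-- ===== CLAIM (what is proved, stated in full; the proofs are below) =====
def Claim_equal_tamper : Prop := ∀ (payload : String), Dom_tamper payload → Spec_tamper payload (tamper payload)

-- ===== LEMMAS AND PROOFS =====
def tamperF (c : Char) : List Char := if c ∈ tamperDigits then tamperWrap c else [c]

theorem tamperF_of_all_nondigit (l : List Char) (h : ∀ c ∈ l, c ∉ tamperDigits) :
    l.flatMap tamperF = l := by
  induction l with
  | nil => rfl
  | cons c t ih =>
    simp only [List.flatMap_cons, tamperF, if_neg (h c (by simp))]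
    simp [ih (fun x hx => h x (by simp [hx]))]

theorem tamperStep_acc (s : List Char) (cuts : List (Int × Char)) :
    ∀ (acc : List (List Char)) (prev : Int),
    cuts.foldl (tamperStep s) (acc, prev) =
      (acc ++ (cuts.foldl (tamperStep s) ([], prev)).1,
        (cuts.foldl (tamperStep s) ([], prev)).2) := by
  induction cuts with
  | nil => intro acc prev; simp
  | cons p rest ih =>
    intro acc prev
    simp only [List.foldl_cons, tamperStep]
    rw [ih]
    simp only [List.nil_append]
    rw [ih [PySem.List.slice s (some prev) (some p.1), tamperWrap p.2]]
    simp

-- elements of the gap slice between two digit positions are non-digits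
theorem tamper_gap_nondigit (s : List Char) (k prev : Nat)
    (h : ∀ j : Nat, prev ≤ j → j < k → ∀ hl : j < s.length, s[j] ∉ tamperDigits) :
    ∀ c ∈ (s.drop prev).take (k - prev), c ∉ tamperDigits := by
  intro c hc
  obtain ⟨i, hi, hget⟩ := List.getElem_of_mem hc
  have hlen : i < k - prev := lt_of_lt_of_le hi (by simp)
  have hlen2 : prev + i < s.length := by
    have := hi
    simp [List.length_take, List.length_drop] at this
    omega
  have hpi : s[prev + i] = c := by
    rw [← hget, List.getElem_take, List.getElem_drop]
  exact hpi ▸ h (prev + i) (by omega) (by omega) hlen2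

-- main stitching invariant
theorem tamper_stitch (s : List Char) : ∀ (t : List Char) (k prev : Nat),
    t = s.drop k → prev ≤ k →
    (∀ j : Nat, prev ≤ j → j < k → ∀ h : j < s.length, s[j] ∉ tamperDigits) →
    (let r := ((PySem.List.enumerate t (k : Int)).filter (fun p => p.2 ∈ tamperDigits)).foldl
        (tamperStep s) ([], (prev : Int));
      (r.1 ++ [PySem.List.slice s (some r.2) none]).flatten) = (s.drop prev).flatMap tamperF := by
  intro t
  induction t with
  | nil =>
    intro k prev ht hpk h
    have hk : s.length ≤ k := by
      have := ht.symm
      rwa [List.drop_eq_nil_iff] at this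
    simp only [PySem.List.enumerate_nil, List.filter_nil, List.foldl_nil, List.nil_append,
      List.flatten, PySem.List.slice_from_natCast]
    have hall : ∀ c ∈ s.drop prev, c ∉ tamperDigits := by
      intro c hc
      have : c ∈ (s.drop prev).take (s.length - prev) := by
        rwa [List.take_of_length_le (by simp)]
      exact tamper_gap_nondigit s s.length prev (fun j hj hjk hl => h j hj (by omega) hl) c this
    rw [tamperF_of_all_nondigit _ hall]
    simp
  | cons c t' ih =>
    intro k prev ht hpk h
    have hklen : k < s.length := by
      by_contra hge
      rw [List.drop_eq_nil_iff.mpr (by omega)] at ht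
      simp at ht
    have hsk : s[k] = c := by
      have : (s.drop k)[0]'(by rw [← ht]; simp) = c := by simp [← ht]
      simpa using this
    have ht' : t' = s.drop (k + 1) := by
      have h2 : List.drop 1 (c :: t') = List.drop 1 (List.drop k s) := by rw [ht]
      simpa [List.drop_drop, Nat.add_comm] using h2
    simp only [PySem.List.enumerate_cons]
    by_cases hc : c ∈ tamperDigits
    · simp only [List.filter_cons, hc, decide_true, if_true, List.foldl_cons, tamperStep,
        List.nil_append]
      have hcast : (k : Int) + 1 = ((k + 1 : Nat) : Int) := by push_cast; ring
      rw [hcast, tamperStep_acc]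
      have hinner := ih (k + 1) (k + 1) ht' (le_refl _) (fun j hj hjk _ => by omega)
      simp only at hinner
      have hsplit : s.drop prev = (s.drop prev).take (k - prev) ++ c :: t' := by
        have h1 : (s.drop prev).drop (k - prev) = s.drop k := by
          rw [List.drop_drop]
          congr 1
          omega
        calc s.drop prev = (s.drop prev).take (k - prev) ++ (s.drop prev).drop (k - prev) := by
              rw [List.take_append_drop]
          _ = (s.drop prev).take (k - prev) ++ c :: t' := by rw [h1, ← ht]
      rw [hsplit, List.flatMap_append, List.flatMap_cons]
      rw [tamperF_of_all_nondigit _ (tamper_gap_nondigit s k prev h)]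
      simp only [List.cons_append, List.flatten_cons, List.nil_append]
      rw [hinner]
      rw [PySem.List.slice_natCast]
      simp [tamperF, hc, ht']
    · simp only [List.filter_cons, hc, decide_false]
      have hcast : (k : Int) + 1 = ((k + 1 : Nat) : Int) := by push_cast; ring
      rw [hcast]
      have := ih (k + 1) prev ht' (by omega)
        (fun j hj hjk hl => by
          by_cases hjk' : j < k
          · exact h j hj hjk' hl
          · have : j = k := by omega
            subst this
            rw [hsk]
            exact hc)
      simpa using this

-- ===== VERDICT (by name: the statement is the Claim_ definition above) =====
theorem tamper_spec : Claim_equal_tamper := by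
  intro payload _
  show tamper payload = tamper_alt payload
  unfold tamper tamper_alt
  rw [PySem.List.foldl_append_eq_flatMap]
  have h := tamper_stitch payload.toList payload.toList 0 0 List.drop_zero.symm (le_refl 0)
      (fun j hj hjk _ => absurd hjk (by omega))
  simp only [Nat.cast_zero, List.drop_zero] at h
  simp only [List.nil_append]
  congr 1
  exact h.symm
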